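-- pv_equiv track=rewrite | github.com/bar-boko/GAPlus | Code/compiler2.py | _Create_ArgumentsDictionary
-- ===== SOURCE A (Python) =====
-- def _Create_ArgumentsDictionary ( lst ):
--     result = {}
--     count = 0
--
--     for args in lst:
--         for arg in args:
--             if not arg in result:
--                 result [arg] = count
--                 count = count + 1
--
--     return result
-- ===== SOURCE B (Python) =====
-- def _Create_ArgumentsDictionary(lst):
--     # rank-by-first-occurrence: record each argument's first position by
--     # overwriting while sweeping backwards, then sort the keys by that
--     # position and number them
--     flat = [arg for args in lst for arg in args]
--     first = {}
--     for i, arg in reversed(list(enumerate(flat))):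
--         first[arg] = i
--     return {arg: rank for rank, arg in enumerate(sorted(first, key=first.get))}
-- ===== Notes on version B (the rewrite author's own statement) =====
-- stated objective: alternative
-- what changed: Replaces A's single forward pass with a membership-guarded running counter by a rank-by-first-occurrence scheme: a backward overwrite pass records each argument's first position, then the keys are sorted by that position and numbered.
import Mathlib
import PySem

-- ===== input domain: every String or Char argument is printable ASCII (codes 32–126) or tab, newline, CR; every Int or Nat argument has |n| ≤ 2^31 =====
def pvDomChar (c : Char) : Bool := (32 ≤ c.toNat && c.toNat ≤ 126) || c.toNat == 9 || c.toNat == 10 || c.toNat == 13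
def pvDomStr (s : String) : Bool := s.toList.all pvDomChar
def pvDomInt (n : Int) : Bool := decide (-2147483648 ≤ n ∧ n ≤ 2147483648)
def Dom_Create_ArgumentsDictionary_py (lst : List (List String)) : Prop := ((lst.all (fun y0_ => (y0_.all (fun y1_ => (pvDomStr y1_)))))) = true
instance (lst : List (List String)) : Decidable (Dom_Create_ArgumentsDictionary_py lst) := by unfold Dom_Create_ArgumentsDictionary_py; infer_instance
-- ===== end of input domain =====

-- B replaces A's single forward pass with a running counter by rank-by-first-occurrence:
-- a backward overwrite pass records each argument's first position, then the keys are
-- sorted by that position and numbered (alternative decomposition, not claimed faster).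

-- ===== PORT A =====
-- the body of A's double loop: insert unseen keys with the running counter
def pvStepA (st : PySem.Dict String Int × Int) (arg : String) : PySem.Dict String Int × Int :=
  if st.1.contains arg then st else (st.1.insert arg st.2, st.2 + 1)

def Create_ArgumentsDictionary_py (lst : List (List String)) : List (String × Int) :=
  (lst.foldl (fun st args => args.foldl pvStepA st)
    ((PySem.Dict.empty : PySem.Dict String Int), (0 : Int))).1.items

-- ===== PORT B =====
def Create_ArgumentsDictionary_py_alt (lst : List (List String)) : List (String × Int) :=
  -- flat = [arg for args in lst for arg in args]
  let flat := lst.flatMap id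
  -- for i, arg in reversed(list(enumerate(flat))): first[arg] = i
  let first := ((PySem.List.enumerate flat).reverse).foldl
      (fun d p => d.insert p.2 p.1) (PySem.Dict.empty : PySem.Dict String Int)
  -- sorted(first, key=first.get): every key of `first` is present, so first.get(k)
  -- is exactly first.getD k 0 here
  let order := PySem.List.sorted first.keys (fun k => first.getD k 0) false
  -- {arg: rank for rank, arg in enumerate(order)} : distinct keys, appended in order
  (PySem.List.enumerate order).map (fun p => (p.2, p.1))

-- ===== PRECONDITION & SPEC =====
def Spec_Create_ArgumentsDictionary_py (lst : List (List String)) (out : List (String × Int)) : Prop := out = Create_ArgumentsDictionary_py_alt lst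
instance (lst : List (List String)) (out : List (String × Int)) : Decidable (Spec_Create_ArgumentsDictionary_py lst out) := by unfold Spec_Create_ArgumentsDictionary_py; infer_instance

-- ===== CLAIM (what is proved, stated in full; the proofs are below) =====
def Claim_equal_Create_ArgumentsDictionary_py : Prop := ∀ (lst : List (List String)), Dom_Create_ArgumentsDictionary_py lst → Spec_Create_ArgumentsDictionary_py lst (Create_ArgumentsDictionary_py lst)

-- ===== LEMMAS AND PROOFS =====

-- the dict A has built after having seen exactly the distinct strings u, in order
def pvDictOf (u : List String) : PySem.Dict String Int :=
  PySem.Dict.mk ((PySem.List.enumerate u).map (fun p => (p.2, p.1)))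

theorem pvKeys_dictOf (u : List String) : (pvDictOf u).keys = u := by
  simp [pvDictOf, PySem.Dict.keys, List.map_map, Function.comp_def,
    PySem.List.map_snd_enumerate]

theorem pvContains_dictOf (u : List String) (a : String) :
    (pvDictOf u).contains a = decide (a ∈ u) := by
  rw [PySem.Dict.contains_eq_decide_mem_keys, pvKeys_dictOf]

theorem pvDictOf_snoc (u : List String) (a : String) (h : a ∉ u) :
    (pvDictOf u).insert a (u.length : Int) = pvDictOf (u ++ [a]) := by
  apply PySem.Dict.ext
  rw [PySem.Dict.items_insert_of_not_contains]
  · simp [pvDictOf, PySem.List.enumerate_append, PySem.List.enumerate_cons]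
  · rw [pvContains_dictOf]; simpa using h

theorem pvNestedEqFlat (lst : List (List String)) (init : PySem.Dict String Int × Int) :
    lst.foldl (fun st args => args.foldl pvStepA st) init
      = (lst.flatMap id).foldl pvStepA init := by
  induction lst generalizing init with
  | nil => rfl
  | cons a l ih => simp [List.foldl_append, ih]

theorem pvInv (xs : List String) (u : List String) :
    xs.foldl pvStepA (pvDictOf u, (u.length : Int))
      = (pvDictOf (PySem.Set.update u xs), ((PySem.Set.update u xs).length : Int)) := by
  induction xs generalizing u with
  | nil => simp [PySem.Set.update]
  | cons x xs ih =>
      by_cases hx : x ∈ u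
      · have hstep : pvStepA (pvDictOf u, (u.length : Int)) x = (pvDictOf u, (u.length : Int)) := by
          simp [pvStepA, pvContains_dictOf, hx]
        have hadd : PySem.Set.add u x = u := by simp [PySem.Set.add, PySem.Set.contains, hx]
        simpa [List.foldl_cons, hstep, PySem.Set.update, hadd] using ih u
      · have hstep : pvStepA (pvDictOf u, (u.length : Int)) x
            = (pvDictOf (u ++ [x]), ((u ++ [x]).length : Int)) := by
          simp [pvStepA, pvContains_dictOf, hx, pvDictOf_snoc u x hx]
        have hadd : PySem.Set.add u x = u ++ [x] := by
          simp [PySem.Set.add, PySem.Set.contains, hx]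
        simpa [List.foldl_cons, hstep, PySem.Set.update, hadd] using ih (u ++ [x])

-- A equals enumerate-of-ordered-dedup, swapped
theorem pvA_eq (lst : List (List String)) :
    Create_ArgumentsDictionary_py lst
      = (PySem.List.enumerate (PySem.List.dedup (lst.flatMap id))).map (fun p => (p.2, p.1)) := by
  unfold Create_ArgumentsDictionary_py
  rw [pvNestedEqFlat]
  have h0 : ((PySem.Dict.empty : PySem.Dict String Int), (0 : Int))
      = (pvDictOf [], (([] : List String).length : Int)) := by
    simp [pvDictOf, PySem.List.enumerate_nil]; rfl
  rw [h0, pvInv, PySem.Set.update_nil_left, PySem.List.dedup_eq_ofList]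
  rfl

-- B's backward pass, in foldr form, with a generalized enumerate start
def pvBack (xs : List String) (s : Int) : PySem.Dict String Int :=
  (PySem.List.enumerate xs s).foldr (fun p d => d.insert p.2 p.1) PySem.Dict.empty

-- core idxOf? at a member is `some idxOf`
theorem pvIdxOf?_of_mem (k : String) (xs : List String) (h : k ∈ xs) :
    List.idxOf? k xs = some (xs.idxOf k) := by
  cases hx : List.idxOf? k xs with
  | none => rw [List.idxOf?_eq_none_iff] at hx; exact absurd h hx
  | some i => simp [List.idxOf_eq_getD_idxOf?, hx]

theorem pvBack_get? (xs : List String) (s : Int) (k : String) :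
    (pvBack xs s).get? k = (PySem.List.index? xs k).map (fun i => s + (i : Int)) := by
  induction xs generalizing s with
  | nil => simp [pvBack, PySem.List.enumerate_nil, PySem.Dict.get?_empty]
  | cons x t ih =>
      rw [pvBack, PySem.List.enumerate_cons]
      simp only [List.foldr_cons]
      rw [PySem.Dict.get?_insert]
      rw [show ((PySem.List.enumerate t (s+1)).foldr (fun p d => d.insert p.2 p.1)
            PySem.Dict.empty) = pvBack t (s+1) from rfl, ih]
      by_cases hk : k = x
      · subst hk
        simp [PySem.List.index?_eq_idxOf?, List.idxOf?_cons]
      · have hxk : (x == k) = false := by simpa using (Ne.symm hk)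
        simp only [if_neg hk, PySem.List.index?_eq_idxOf?, List.idxOf?_cons, hxk,
          Bool.false_eq_true, if_false]
        cases List.idxOf? k t <;> simp [Int.add_assoc, Int.add_comm 1]

theorem pvBack_mem_keys (xs : List String) (s : Int) (k : String) :
    k ∈ (pvBack xs s).keys ↔ k ∈ xs := by
  induction xs generalizing s with
  | nil => simp [pvBack, PySem.List.enumerate_nil, PySem.Dict.keys_empty]
  | cons x t ih =>
      rw [pvBack, PySem.List.enumerate_cons]
      simp only [List.foldr_cons]
      rw [show ((PySem.List.enumerate t (s+1)).foldr (fun p d => d.insert p.2 p.1)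
            PySem.Dict.empty) = pvBack t (s+1) from rfl]
      rw [PySem.Dict.mem_keys_insert]
      simp [ih]

theorem pvBack_nodup_keys (xs : List String) (s : Int) : (pvBack xs s).keys.Nodup := by
  induction xs generalizing s with
  | nil => simp [pvBack, PySem.List.enumerate_nil, PySem.Dict.keys_empty]
  | cons x t ih =>
      rw [pvBack, PySem.List.enumerate_cons]
      simp only [List.foldr_cons]
      rw [show ((PySem.List.enumerate t (s+1)).foldr (fun p d => d.insert p.2 p.1)
            PySem.Dict.empty) = pvBack t (s+1) from rfl]
      exact PySem.Dict.nodup_keys_insert _ _ _ (ih (s+1))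

theorem pvBack_getD (xs : List String) (k : String) (h : k ∈ xs) :
    (pvBack xs 0).getD k 0 = (xs.idxOf k : Int) := by
  rw [PySem.Dict.getD_eq_get?_getD, pvBack_get? xs 0 k]
  rw [PySem.List.index?_eq_idxOf?, pvIdxOf?_of_mem k xs h]
  simp

-- first occurrences appear in `dedup` in strictly increasing position order
theorem pvDedup_pairwise_idxOf (xs : List String) :
    (PySem.List.dedup xs).Pairwise (fun a b => (xs.idxOf a : Int) < (xs.idxOf b : Int)) := by
  rw [PySem.List.dedup_eq_ofList]
  induction xs using List.reverseRecOn with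
  | nil => simp [PySem.Set.ofList_nil]
  | append_singleton t y ih =>
      rw [PySem.Set.ofList_append_singleton]
      by_cases hy : y ∈ t
      · rw [PySem.Set.add_of_mem (((PySem.Set.mem_ofList _ _).mpr) hy)]
        refine ih.imp_of_mem ?_
        intro a b ha hb hab
        have ha' : a ∈ t := ((PySem.Set.mem_ofList _ _).mp) ha
        have hb' : b ∈ t := ((PySem.Set.mem_ofList _ _).mp) hb
        rwa [List.idxOf_append_of_mem ha', List.idxOf_append_of_mem hb']
      · rw [PySem.Set.add_of_not_mem (fun hc => hy (((PySem.Set.mem_ofList _ _).mp) hc))]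
        rw [List.pairwise_append]
        refine ⟨?_, by simp, ?_⟩
        · refine ih.imp_of_mem ?_
          intro a b ha hb hab
          have ha' : a ∈ t := ((PySem.Set.mem_ofList _ _).mp) ha
          have hb' : b ∈ t := ((PySem.Set.mem_ofList _ _).mp) hb
          rwa [List.idxOf_append_of_mem ha', List.idxOf_append_of_mem hb']
        · intro a ha b hb
          have ha' : a ∈ t := ((PySem.Set.mem_ofList _ _).mp) ha
          have hb' : b = y := by simpa using hb
          subst hb'
          rw [List.idxOf_append_of_mem ha']
          have h1 : t.idxOf a < t.length := List.idxOf_lt_length_of_mem ha'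
          have h2 : t.length ≤ (t ++ [b]).idxOf b := by
            by_contra hlt
            rw [Nat.not_le] at hlt
            have := List.idxOf_lt_length_of_mem (by simp : b ∈ t ++ [b])
            have hget := List.getElem_idxOf (xs := t ++ [b]) (x := b) this
            rw [List.getElem_append_left hlt] at hget
            exact hy (hget ▸ List.getElem_mem hlt)
          exact_mod_cast lt_of_lt_of_le h1 h2

-- the sort in B reproduces first-seen order
theorem pvSorted_eq (flat : List String) :
    PySem.List.sorted (pvBack flat 0).keys (fun k => (pvBack flat 0).getD k 0) false
      = PySem.List.dedup flat := by
  apply PySem.List.sorted_eq_of_perm_of_pairwise_lt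
  · rw [List.perm_ext_iff_of_nodup (PySem.List.nodup_dedup flat) (pvBack_nodup_keys flat 0)]
    intro a
    rw [PySem.List.mem_dedup, pvBack_mem_keys]
  · refine (pvDedup_pairwise_idxOf flat).imp_of_mem ?_
    intro a b ha hb hab
    have ha' : a ∈ flat := (PySem.List.mem_dedup _ _).mp ha
    have hb' : b ∈ flat := (PySem.List.mem_dedup _ _).mp hb
    rwa [pvBack_getD flat a ha', pvBack_getD flat b hb']

-- ===== VERDICT (by name: the statement is the Claim_ definition above) =====
theorem Create_ArgumentsDictionary_py_spec : Claim_equal_Create_ArgumentsDictionary_py := by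
  intro lst _
  show Create_ArgumentsDictionary_py lst = Create_ArgumentsDictionary_py_alt lst
  have hfold : ((PySem.List.enumerate (lst.flatMap id)).reverse).foldl
      (fun d p => d.insert p.2 p.1) (PySem.Dict.empty : PySem.Dict String Int)
      = pvBack (lst.flatMap id) 0 := by
    rw [List.foldl_reverse]; rfl
  show Create_ArgumentsDictionary_py lst
      = (PySem.List.enumerate (PySem.List.sorted
          (((PySem.List.enumerate (lst.flatMap id)).reverse).foldl
            (fun d p => d.insert p.2 p.1) (PySem.Dict.empty : PySem.Dict String Int)).keys
          (fun k => (((PySem.List.enumerate (lst.flatMap id)).reverse).foldl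
            (fun d p => d.insert p.2 p.1)
            (PySem.Dict.empty : PySem.Dict String Int)).getD k 0) false)).map
        (fun p => (p.2, p.1))
  rw [hfold, pvSorted_eq, pvA_eq]
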